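-- pv_equiv track=rewrite | github.com/burapol01/Bitkub_Bot | ui/streamlit/pages.py | _summarize_strategy_decision_counts
-- ===== SOURCE A (Python) =====
-- from typing import Any, MutableMapping
--
-- def _summarize_strategy_decision_counts(
--     rows: list[dict[str, Any]],
-- ) -> dict[str, int]:
--     counts = {
--         "Promote": 0,
--         "Keep": 0,
--         "Prune candidate": 0,
--         "Sync first": 0,
--     }
--     for row in rows:
--         action = str(row.get("recommended_action") or "")
--         if action in counts:
--             counts[action] += 1
--     return counts
-- ===== SOURCE B (Python) =====
-- def _summarize_strategy_decision_counts(rows):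
--     return {
--         key: sum(
--             1
--             for row in rows
--             if str(row.get("recommended_action") or "") == key
--         )
--         for key in ("Promote", "Keep", "Prune candidate", "Sync first")
--     }
-- ===== Notes on version B (the rewrite author's own statement) =====
-- stated objective: alternative
-- what changed: A makes one accumulating pass over rows maintaining a mutable dict of counts; B instead iterates over the four known category keys and, for each, scans rows counting how many normalize to that key (loop nesting inverted, no running dict).
import Mathlib
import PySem

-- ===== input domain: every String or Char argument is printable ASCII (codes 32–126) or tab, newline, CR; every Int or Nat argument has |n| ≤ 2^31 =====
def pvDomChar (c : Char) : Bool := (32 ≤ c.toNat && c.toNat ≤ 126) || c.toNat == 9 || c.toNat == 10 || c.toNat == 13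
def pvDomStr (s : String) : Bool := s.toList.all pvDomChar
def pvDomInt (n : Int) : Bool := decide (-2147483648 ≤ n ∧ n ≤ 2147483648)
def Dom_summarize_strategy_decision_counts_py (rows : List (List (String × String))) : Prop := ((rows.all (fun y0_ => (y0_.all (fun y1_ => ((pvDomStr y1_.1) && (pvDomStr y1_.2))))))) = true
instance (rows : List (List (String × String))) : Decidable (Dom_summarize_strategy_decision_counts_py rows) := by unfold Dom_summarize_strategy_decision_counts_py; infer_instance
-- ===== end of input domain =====

-- B replaces A's single accumulating pass over rows maintaining a mutable count dict by four
-- independent per-category scans, one counting sum per known key (objective: alternative decomposition).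

-- ===== PORT A =====
-- action = str(row.get("recommended_action") or "")  (values are strings, so str(...) is identity;
-- None/"" both normalize to "")
def pvAct (row : List (String × String)) : String :=
  match (PySem.Dict.mk row).get? "recommended_action" with
  | some s => if s = "" then "" else s
  | none => ""

-- the body of A's for-loop: if action in counts: counts[action] += 1
def pvStep (counts : PySem.Dict String Int) (row : List (String × String)) : PySem.Dict String Int :=
  let action := pvAct row
  if counts.contains action then counts.modify action 0 (· + 1) else counts

def summarize_strategy_decision_counts_py (rows : List (List (String × String))) : List (String × Int) :=
  let counts : PySem.Dict String Int :=
    ((((PySem.Dict.empty.insert "Promote" 0).insert "Keep" 0).insert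
        "Prune candidate" 0).insert "Sync first" 0)
  (rows.foldl pvStep counts).items

-- ===== PORT B =====
def summarize_strategy_decision_counts_py_alt (rows : List (List (String × String))) : List (String × Int) :=
  ["Promote", "Keep", "Prune candidate", "Sync first"].map
    (fun key => (key, (rows.map (fun row => if pvAct row = key then (1 : Int) else 0)).sum))

-- ===== PRECONDITION & SPEC =====
def Spec_summarize_strategy_decision_counts_py (rows : List (List (String × String))) (out : List (String × Int)) : Prop := out = summarize_strategy_decision_counts_py_alt rows
instance (rows : List (List (String × String))) (out : List (String × Int)) : Decidable (Spec_summarize_strategy_decision_counts_py rows out) := by unfold Spec_summarize_strategy_decision_counts_py; infer_instance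

-- ===== CLAIM (what is proved, stated in full; the proofs are below) =====
def Claim_equal_summarize_strategy_decision_counts_py : Prop := ∀ (rows : List (List (String × String))), Dom_summarize_strategy_decision_counts_py rows → Spec_summarize_strategy_decision_counts_py rows (summarize_strategy_decision_counts_py rows)

-- ===== LEMMAS AND PROOFS =====

-- per-category 0/1 count that B computes
def pvCnt (k : String) (rows : List (List (String × String))) : Int :=
  (rows.map (fun row => if pvAct row = k then (1 : Int) else 0)).sum

theorem pvCnt_cons (k : String) (r : List (String × String)) (rs : List (List (String × String))) :
    pvCnt k (r :: rs) = (if pvAct r = k then (1 : Int) else 0) + pvCnt k rs := by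
  simp [pvCnt]

-- invariant of A's loop over a dict holding exactly the four category keys
theorem pvLoop (rows : List (List (String × String))) (a b c d : Int) :
    rows.foldl pvStep
        (PySem.Dict.mk [("Promote", a), ("Keep", b), ("Prune candidate", c), ("Sync first", d)])
      = PySem.Dict.mk [("Promote", a + pvCnt "Promote" rows), ("Keep", b + pvCnt "Keep" rows),
          ("Prune candidate", c + pvCnt "Prune candidate" rows),
          ("Sync first", d + pvCnt "Sync first" rows)] := by
  induction rows generalizing a b c d with
  | nil => simp [pvCnt]
  | cons r rs ih =>
    rw [List.foldl_cons]
    by_cases h1 : pvAct r = "Promote"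
    · have : pvStep (PySem.Dict.mk [("Promote", a), ("Keep", b), ("Prune candidate", c), ("Sync first", d)]) r
          = PySem.Dict.mk [("Promote", a + 1), ("Keep", b), ("Prune candidate", c), ("Sync first", d)] := by
        simp [pvStep, h1, PySem.Dict.contains, PySem.Dict.modify, PySem.Dict.getD,
          PySem.Dict.get?_mk_cons, PySem.Dict.insert]
      rw [this, ih]
      simp [pvCnt_cons, h1]; omega
    · by_cases h2 : pvAct r = "Keep"
      · have : pvStep (PySem.Dict.mk [("Promote", a), ("Keep", b), ("Prune candidate", c), ("Sync first", d)]) r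
            = PySem.Dict.mk [("Promote", a), ("Keep", b + 1), ("Prune candidate", c), ("Sync first", d)] := by
          simp [pvStep, h2, PySem.Dict.contains, PySem.Dict.modify, PySem.Dict.getD,
            PySem.Dict.get?_mk_cons, PySem.Dict.insert]
        rw [this, ih]
        simp [pvCnt_cons, h2]; omega
      · by_cases h3 : pvAct r = "Prune candidate"
        · have : pvStep (PySem.Dict.mk [("Promote", a), ("Keep", b), ("Prune candidate", c), ("Sync first", d)]) r
              = PySem.Dict.mk [("Promote", a), ("Keep", b), ("Prune candidate", c + 1), ("Sync first", d)] := by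
            simp [pvStep, h3, PySem.Dict.contains, PySem.Dict.modify, PySem.Dict.getD,
              PySem.Dict.get?_mk_cons, PySem.Dict.insert]
          rw [this, ih]
          simp [pvCnt_cons, h3]; omega
        · by_cases h4 : pvAct r = "Sync first"
          · have : pvStep (PySem.Dict.mk [("Promote", a), ("Keep", b), ("Prune candidate", c), ("Sync first", d)]) r
                = PySem.Dict.mk [("Promote", a), ("Keep", b), ("Prune candidate", c), ("Sync first", d + 1)] := by
              simp [pvStep, h4, PySem.Dict.contains, PySem.Dict.modify, PySem.Dict.getD,
                PySem.Dict.get?_mk_cons, PySem.Dict.insert]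
            rw [this, ih]
            simp [pvCnt_cons, h4]; omega
          · have : pvStep (PySem.Dict.mk [("Promote", a), ("Keep", b), ("Prune candidate", c), ("Sync first", d)]) r
                = PySem.Dict.mk [("Promote", a), ("Keep", b), ("Prune candidate", c), ("Sync first", d)] := by
              simp [pvStep, PySem.Dict.contains]
              intro h
              rcases h with h | h | h | h
              · exact absurd h.symm h1
              · exact absurd h.symm h2
              · exact absurd h.symm h3
              · exact absurd h.symm h4
            rw [this, ih]
            simp [pvCnt_cons, h1, h2, h3, h4]

-- ===== VERDICT (by name: the statement is the Claim_ definition above) =====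
theorem summarize_strategy_decision_counts_py_spec : Claim_equal_summarize_strategy_decision_counts_py := by
  intro rows _
  show summarize_strategy_decision_counts_py rows = summarize_strategy_decision_counts_py_alt rows
  have hA : summarize_strategy_decision_counts_py rows
      = (rows.foldl pvStep
          (PySem.Dict.mk [("Promote", 0), ("Keep", 0), ("Prune candidate", 0), ("Sync first", 0)])).items := rfl
  rw [hA, pvLoop]
  simp [summarize_strategy_decision_counts_py_alt, pvCnt]
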